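-- pv_equiv track=rewrite | github.com/inforgstr/FSPR4-22 | Semester_1/lesson_13/hw13-4.py | f
-- ===== SOURCE A (Python) =====
-- def f(n):
--     '''If no argument is given, the constructor creates a new empty list.
--         The argument must be an iterable if specified'''
--     shades = []
--     second = '0123456789abcdef'
--     first = '0123456789abcdef'
--     if n < 0:
--         return shades
--     counter = 0
--     for i in range(n//10+1):
--         if counter == 16: # 0 1 2 3 4 5 6 7 ...
--             counter = 0
--             # 11            11
--         # if (n + 1) == len(shades) or len(shades) == 255: # 0 1 2 3
--         #     break
--         for _ in range(16):
--             if (n + 1) == len(shades) or len(shades) == 255: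
--                 break
--             h = f'#{first[counter]}{second[_]}{first[counter]}{second[_]}{first[counter]}{second[_]}'
--             shades.append(h)
--         counter += 1
--
--     if shades:
--         shades.pop(0)
--
--     return shades
-- ===== SOURCE B (Python) =====
-- def f(n):
--     if n < 0:
--         return []
--     hexd = '0123456789abcdef'
--     N = min(16 * (n // 10 + 1), n + 1, 255)
--     return ['#' + (hexd[j // 16] + hexd[j % 16]) * 3 for j in range(1, N)]
-- ===== Notes on version B (the rewrite author's own statement) =====
-- stated objective: faster
-- what changed: Replaces the break-guarded nested loops (which keep iterating the outer range(n//10+1) idly after the cap is reached) with a closed-form output count N = min(16*(n//10+1), n+1, 255) and a single flat pass over range(1, N) using index arithmetic j//16, j%16.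
import Mathlib
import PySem

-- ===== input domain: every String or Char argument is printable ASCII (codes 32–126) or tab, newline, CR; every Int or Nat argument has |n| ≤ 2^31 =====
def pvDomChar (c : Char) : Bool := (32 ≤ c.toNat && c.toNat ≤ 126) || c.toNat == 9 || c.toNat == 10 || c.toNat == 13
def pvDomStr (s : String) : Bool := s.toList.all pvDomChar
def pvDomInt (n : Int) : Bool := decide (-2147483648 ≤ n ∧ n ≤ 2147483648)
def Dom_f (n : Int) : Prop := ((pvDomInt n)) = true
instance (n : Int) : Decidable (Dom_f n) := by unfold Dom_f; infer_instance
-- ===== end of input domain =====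

-- B replaces A's break-guarded nested loops (with idle outer iterations) by a closed-form
-- output count and one flat indexed pass: faster (A does Θ(n/10) outer iterations, B at most 255 steps).

-- ===== PORT A =====
-- '0123456789abcdef' (both `first` and `second` in A)
def hexChars : List Char := ['0','1','2','3','4','5','6','7','8','9','a','b','c','d','e','f']

-- f'#{first[c]}{second[j]}' * 3 pattern; getD's default is never used (c,j < 16 at every call)
def mkColor (c j : Nat) : String :=
  let a := hexChars.getD c ' '
  let b := hexChars.getD j ' '
  String.mk ['#', a, b, a, b, a, b]

-- inner `for _ in range(16)` with its break; fuel counts remaining iterations, _ = 16 - fuel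
def innerA (n : Int) (c : Nat) : Nat → List String → List String
  | 0, shades => shades
  | fuel+1, shades =>
      if (n + 1 = (shades.length : Int)) ∨ shades.length = 255 then shades
      else innerA n c fuel (shades ++ [mkColor c (16 - (fuel+1))])

-- outer `for i in range(n//10+1)` with the counter reset-at-16 logic
def outerA (n : Int) : Nat → Nat → List String → List String
  | 0, _, shades => shades
  | k+1, counter, shades =>
      let c := if counter = 16 then 0 else counter
      outerA n k (c + 1) (innerA n c 16 shades)

def f (n : Int) : List String :=
  if n < 0 then []
  else
    let shades := outerA n ((PySem.Int.floordiv n 10) + 1).toNat 0 []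
    -- `if shades: shades.pop(0)` then return shades: drop the head when nonempty
    shades.tail

-- ===== PORT B =====
-- '#' + (hexd[j // 16] + hexd[j % 16]) * 3
def shadeB (j : Nat) : String :=
  let a := hexChars.getD (j / 16) ' '
  let b := hexChars.getD (j % 16) ' '
  String.mk ['#', a, b, a, b, a, b]

def f_alt (n : Int) : List String :=
  if n < 0 then []
  else
    let N := min (min (16 * (PySem.Int.floordiv n 10 + 1)) (n + 1)) 255
    ((List.range N.toNat).drop 1).map shadeB

-- ===== PRECONDITION & SPEC =====
def Spec_f (n : Int) (out : List String) : Prop := out = f_alt n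
instance (n : Int) (out : List String) : Decidable (Spec_f n out) := by unfold Spec_f; infer_instance

-- ===== CLAIM (what is proved, stated in full; the proofs are below) =====
def Claim_equal_f : Prop := ∀ (n : Int), Dom_f n → Spec_f n (f n)

-- ===== LEMMAS AND PROOFS =====

-- tail of the mapped range, as a mapped shifted range
theorem tail_map_range (g : Nat → String) (N : Nat) :
    (List.map g (List.range N)).tail = List.map g (List.range' 1 (N - 1)) := by
  cases N with
  | zero => simp
  | succ M => rw [List.range_eq_range', List.range'_succ]; simp

-- the length at which A's inner-loop break fires: min(n+1, 255), as a Nat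
def capN (n : Int) : Nat := (min (n + 1) 255).toNat

-- the full shade sequence of length m
def F (m : Nat) : List String := (List.range m).map shadeB

theorem shadeB_eq (c j : Nat) (hj : j < 16) : shadeB (16 * c + j) = mkColor c j := by
  have h1 : (16 * c + j) / 16 = c := by omega
  have h2 : (16 * c + j) % 16 = j := by omega
  simp [shadeB, mkColor, h1, h2]

theorem F_length (m : Nat) : (F m).length = m := by simp [F]

theorem F_snoc (m : Nat) : F m ++ [shadeB m] = F (m + 1) := by
  simp [F, List.range_succ]

theorem cond_iff (n : Int) (hn : 0 ≤ n) (m : Nat) (hm : m ≤ capN n) :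
    ((n + 1 = (m : Int)) ∨ m = 255) ↔ m = capN n := by
  unfold capN at *; omega

-- inner loop no-op once the break condition holds
theorem innerA_noop (n : Int) (c fuel : Nat) (s : List String)
    (h : (n + 1 = (s.length : Int)) ∨ s.length = 255) :
    innerA n c fuel s = s := by
  cases fuel with
  | zero => rfl
  | succ fuel => simp [innerA, h]

-- inner loop invariant: starting at position m = 16*c + (16 - fuel), it extends the
-- prefix to length min (16*c + 16) (capN n)
theorem innerA_run (n : Int) (hn : 0 ≤ n) (c : Nat) :
    ∀ fuel, fuel ≤ 16 → ∀ m, m = 16 * c + (16 - fuel) → m ≤ capN n →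
    innerA n c fuel (F m) = F (min (16 * c + 16) (capN n)) := by
  intro fuel
  induction fuel with
  | zero =>
    intro _ m hm hle
    have : min (16 * c + 16) (capN n) = m := by omega
    simp [innerA, this]
  | succ fuel ih =>
    intro hf m hm hle
    by_cases hcap : m = capN n
    · have hcond : (n + 1 = ((F m).length : Int)) ∨ (F m).length = 255 := by
        rw [F_length]; exact (cond_iff n hn m hle).mpr hcap
      rw [innerA_noop n c _ _ hcond]
      have : min (16 * c + 16) (capN n) = m := by omega
      rw [this]
    · have hcond : ¬ ((n + 1 = ((F m).length : Int)) ∨ (F m).length = 255) := by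
        rw [F_length]; intro h; exact hcap ((cond_iff n hn m hle).mp h)
      rw [innerA]
      simp only [hcond, if_false]
      have hj : 16 - (fuel + 1) < 16 := by omega
      have hidx : 16 - (fuel + 1) = m - 16 * c := by omega
      have hme : mkColor c (16 - (fuel + 1)) = shadeB m := by
        rw [hm, shadeB_eq c (16 - (fuel + 1)) hj]
      rw [hme, F_snoc]
      exact ih (by omega) (m + 1) (by omega) (by omega)

-- outer loop invariant
theorem outerA_run (n : Int) (hn : 0 ≤ n) :
    ∀ k i counter, (if counter = 16 then 0 else counter) = i % 16 →
    outerA n k counter (F (min (16 * i) (capN n))) = F (min (16 * (i + k)) (capN n)) := by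
  intro k
  induction k with
  | zero => intro i counter _; simp [outerA]
  | succ k ih =>
    intro i counter hctr
    rw [outerA]
    have hcap255 : capN n ≤ 255 := by unfold capN; omega
    by_cases hbig : capN n ≤ 16 * i
    · have hm : min (16 * i) (capN n) = capN n := by omega
      rw [hm]
      have hcond : (n + 1 = ((F (capN n)).length : Int)) ∨ (F (capN n)).length = 255 := by
        rw [F_length]; exact (cond_iff n hn (capN n) le_rfl).mpr rfl
      rw [innerA_noop n _ _ _ hcond]
      have h1 : F (capN n) = F (min (16 * (i + 1)) (capN n)) := by
        have : min (16 * (i + 1)) (capN n) = capN n := by omega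
        rw [this]
      rw [h1, hctr, ih (i + 1) (i % 16 + 1) (by split <;> omega)]
      congr 2
      omega
    · have hi : i < 16 := by omega
      have hmod : i % 16 = i := by omega
      have hm : min (16 * i) (capN n) = 16 * i := by omega
      rw [hm, hctr, hmod]
      rw [innerA_run n hn i 16 le_rfl (16 * i) (by omega) (by omega)]
      have : min (16 * i + 16) (capN n) = min (16 * (i + 1)) (capN n) := by omega
      rw [this, ih (i + 1) (i + 1) (by split <;> omega)]
      congr 2
      omega

theorem f_spec : Claim_equal_f := by
  intro n _
  unfold Spec_f f f_alt
  by_cases hneg : n < 0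
  · simp [hneg]
  · have hn : 0 ≤ n := by omega
    have hfd : PySem.Int.floordiv n 10 = n / 10 := by
      unfold PySem.Int.floordiv; rw [Int.fdiv_eq_ediv]; simp
    simp only [hneg, if_false, hfd]
    have h0 : (F (min (16 * 0) (capN n))) = ([] : List String) := by simp [F]
    have hrun := outerA_run n hn ((n / 10 + 1)).toNat 0 0 (by simp)
    rw [h0] at hrun
    rw [hrun]
    have hN : (min (min (16 * (n / 10 + 1)) (n + 1)) 255).toNat
        = min (16 * (0 + (n / 10 + 1).toNat)) (capN n) := by
      unfold capN; omega
    rw [hN]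
    simp [F, tail_map_range]
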